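-- pv_equiv track=rewrite | github.com/gASK13/AOC | 2023/25/25.py | find_best_node
-- ===== SOURCE A (Python) =====
-- def find_best_node(_map, best_node, best_score, candidates_1, group_1, group_2):
--     for node in candidates_1:
--         group_1.remove(node)
--         group_2.add(node)
--         ps = get_partition_size(_map, group_1, group_2) * len(group_2)
--         if ps < best_score:
--             best_score = ps
--             best_node = node
--         group_1.add(node)
--         group_2.remove(node)
--     return best_node, best_score
--
-- def get_partition_size(_map, g1, g2):
--     ps = 0
--     for n in g1:
--         for e in _map[n]:
--             if e in g2:
--                 ps += 1
--     return ps
-- ===== SOURCE B (Python) =====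
-- def find_best_node(_map, best_node, best_score, candidates_1, group_1, group_2):
--     # Incremental scoring: build the in-degree counter (edges from group_1 into
--     # each node) and the cut size once, then keep both up to date as a candidate
--     # moves between the groups, instead of recomputing the partition cut from
--     # scratch for every candidate.  Performs the same set moves as before.
--     if not candidates_1:
--         return best_node, best_score
--     indeg = {}
--     cut = 0
--     for n in group_1:
--         for e in _map.get(n, []):
--             indeg[e] = indeg.get(e, 0) + 1
--             if e in group_2:
--                 cut += 1
--     for node in candidates_1:
--         # move node out of group_1
--         group_1.remove(node)
--         for e in _map.get(node, []):
--             indeg[e] = indeg.get(e, 0) - 1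
--             if e in group_2:
--                 cut -= 1
--         # and into group_2
--         if node not in group_2:
--             group_2.add(node)
--             cut += indeg.get(node, 0)
--         ps = cut * len(group_2)
--         if ps < best_score:
--             best_score = ps
--             best_node = node
--         # move it back
--         group_2.remove(node)
--         cut -= indeg.get(node, 0)
--         for e in _map.get(node, []):
--             indeg[e] = indeg.get(e, 0) + 1
--             if e in group_2:
--                 cut += 1
--         group_1.add(node)
--     return best_node, best_score
-- ===== Notes on version B (the rewrite author's own statement) =====
-- stated objective: alternative
-- what changed: B builds the in-degree counter and the cut size in one pass over group_1 and keeps both up to date incrementally as a candidate moves between the groups, replacing A's from-scratch recomputation of the partition cut for every candidate.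
import Mathlib
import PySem

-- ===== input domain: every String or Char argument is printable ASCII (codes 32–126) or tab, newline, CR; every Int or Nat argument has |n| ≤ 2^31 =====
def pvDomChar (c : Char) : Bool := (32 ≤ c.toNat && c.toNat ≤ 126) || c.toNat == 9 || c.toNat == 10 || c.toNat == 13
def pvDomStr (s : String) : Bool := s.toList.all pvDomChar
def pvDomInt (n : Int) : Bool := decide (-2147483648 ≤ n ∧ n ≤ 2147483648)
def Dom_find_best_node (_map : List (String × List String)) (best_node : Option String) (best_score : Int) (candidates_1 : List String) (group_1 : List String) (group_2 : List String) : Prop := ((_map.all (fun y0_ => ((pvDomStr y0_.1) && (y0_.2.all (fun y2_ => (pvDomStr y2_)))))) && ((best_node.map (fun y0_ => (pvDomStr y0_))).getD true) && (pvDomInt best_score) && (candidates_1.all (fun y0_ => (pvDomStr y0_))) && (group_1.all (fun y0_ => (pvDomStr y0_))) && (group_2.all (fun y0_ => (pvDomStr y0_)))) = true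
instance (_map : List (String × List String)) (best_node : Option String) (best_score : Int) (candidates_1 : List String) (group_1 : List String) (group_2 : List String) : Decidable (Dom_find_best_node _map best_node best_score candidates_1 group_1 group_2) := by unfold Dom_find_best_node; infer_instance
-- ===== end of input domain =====

-- ===== PORT A =====
-- B replaces A's per-candidate recomputation of the partition cut by incremental maintenance of the
-- cut size and an in-degree counter (objective: alternative).  Both versions mutate group_1/group_2 in place
-- through the same set moves, so their side effects agree wherever both return; the equivalence
-- proved here is about the RETURN value.  get_partition_size iterates Python sets; the sum is
-- order-independent, so folding the representing lists is exact.  _map[n] raises KeyError on a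
-- missing key (B reads rows with dict.get(n, [])) and set.remove on a missing element; Pre_
-- excludes the inputs where A raises, and the ports use getD / remove?.getD there.
def pv_gps (_map : List (String × List String)) (g1 g2 : List String) : Int :=
  g1.foldl (fun ps n =>
    ((PySem.Dict.mk _map).getD n []).foldl
      (fun a e => if PySem.Set.contains g2 e then a + 1 else a) ps) 0

def find_best_node (_map : List (String × List String)) (best_node : Option String) (best_score : Int) (candidates_1 : List String) (group_1 : List String) (group_2 : List String) : Option String × Int :=
  (candidates_1.foldl
    (fun (st : (Option String × Int) × PySem.Set String × PySem.Set String) node =>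
      let g1 := (PySem.Set.remove? st.2.1 node).getD st.2.1
      let g2 := PySem.Set.add st.2.2 node
      let ps := pv_gps _map g1 g2 * PySem.Set.len g2
      ((if ps < st.1.2 then (some node, ps) else st.1),
        PySem.Set.add g1 node, (PySem.Set.remove? g2 node).getD g2))
    ((best_node, best_score), group_1, group_2)).1

-- ===== PORT B =====
-- One pass over group_1 builds the in-degree counter and the cut size; each candidate move then
-- updates both incrementally (remove the node's rows, add it to group_2 if absent, score, undo).
def find_best_node_alt (_map : List (String × List String)) (best_node : Option String) (best_score : Int) (candidates_1 : List String) (group_1 : List String) (group_2 : List String) : Option String × Int :=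
  if candidates_1.isEmpty then (best_node, best_score) else
  let pre := group_1.foldl
    (fun (p : PySem.Dict String Int × Int) n =>
      ((PySem.Dict.mk _map).getD n []).foldl
        (fun p e => (p.1.insert e (p.1.getD e 0 + 1),
                     if PySem.Set.contains group_2 e then p.2 + 1 else p.2)) p)
    (PySem.Dict.empty, 0)
  (candidates_1.foldl
    (fun (st : (Option String × Int) × (PySem.Dict String Int × Int) × PySem.Set String × PySem.Set String) node =>
      let g1 := (PySem.Set.remove? st.2.2.1 node).getD st.2.2.1
      let p1 := ((PySem.Dict.mk _map).getD node []).foldl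
        (fun p e => (p.1.insert e (p.1.getD e 0 - 1),
                     if PySem.Set.contains st.2.2.2 e then p.2 - 1 else p.2)) st.2.1
      let t := if ¬ (node ∈ st.2.2.2) then
          (PySem.Set.add st.2.2.2 node, p1.2 + p1.1.getD node 0)
        else (st.2.2.2, p1.2)
      let ps := t.2 * PySem.Set.len t.1
      let bst := if ps < st.1.2 then (some node, ps) else st.1
      let g2r := (PySem.Set.remove? t.1 node).getD t.1
      let c2 := t.2 - p1.1.getD node 0
      let p2 := ((PySem.Dict.mk _map).getD node []).foldl
        (fun p e => (p.1.insert e (p.1.getD e 0 + 1),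
                     if PySem.Set.contains g2r e then p.2 + 1 else p.2)) (p1.1, c2)
      (bst, p2, PySem.Set.add g1 node, g2r))
    ((best_node, best_score), pre, group_1, group_2)).1

-- ===== PRECONDITION & SPEC =====
-- Pre_ excludes exactly the inputs where A raises KeyError: a candidate absent from group_1
-- (set.remove), or a group_1 node missing from _map whose row some loop iteration looks up —
-- i.e. unless every candidate equals that node (A never reads the current candidate's own row).
-- When the loop runs, the group lists must be duplicate-free, as lists representing Python sets are.
def Pre_find_best_node (_map : List (String × List String)) (best_node : Option String) (best_score : Int) (candidates_1 : List String) (group_1 : List String) (group_2 : List String) : Prop :=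
  (∀ c ∈ candidates_1, c ∈ group_1) ∧
  (candidates_1 ≠ [] →
    group_1.Nodup ∧ group_2.Nodup ∧
    ∀ n ∈ group_1, (PySem.Dict.mk _map).contains n = true ∨ ∀ c ∈ candidates_1, c = n)
instance (_map : List (String × List String)) (best_node : Option String) (best_score : Int) (candidates_1 : List String) (group_1 : List String) (group_2 : List String) : Decidable (Pre_find_best_node _map best_node best_score candidates_1 group_1 group_2) := by unfold Pre_find_best_node; infer_instance

def pvWitness_find_best_node : (List (String × List String)) × Option String × Int × List String × List String × List String :=
  ([("a", ["b"]), ("b", ["a"])], none, 5, ["a"], ["a", "b"], [])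

def Spec_find_best_node (_map : List (String × List String)) (best_node : Option String) (best_score : Int) (candidates_1 : List String) (group_1 : List String) (group_2 : List String) (out : Option String × Int) : Prop := out = find_best_node_alt _map best_node best_score candidates_1 group_1 group_2
instance (_map : List (String × List String)) (best_node : Option String) (best_score : Int) (candidates_1 : List String) (group_1 : List String) (group_2 : List String) (out : Option String × Int) : Decidable (Spec_find_best_node _map best_node best_score candidates_1 group_1 group_2 out) := by unfold Spec_find_best_node; infer_instance

-- ===== CLAIM (what is proved, stated in full; the proofs are below) =====
def Claim_equal_find_best_node : Prop := ∀ (_map : List (String × List String)) (best_node : Option String) (best_score : Int) (candidates_1 : List String) (group_1 : List String) (group_2 : List String), Dom_find_best_node _map best_node best_score candidates_1 group_1 group_2 → Pre_find_best_node _map best_node best_score candidates_1 group_1 group_2 → Spec_find_best_node _map best_node best_score candidates_1 group_1 group_2 (find_best_node _map best_node best_score candidates_1 group_1 group_2)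

-- ===== LEMMAS AND PROOFS =====

-- row of node n in the adjacency dict
def pvRow (_map : List (String × List String)) (n : String) : List String :=
  (PySem.Dict.mk _map).getD n []

-- number of edges from n into g2
def pvC (_map : List (String × List String)) (g2 : List String) (n : String) : Int :=
  ((pvRow _map n).countP (fun e => PySem.Set.contains g2 e) : Int)

-- number of edges from n to v
def pvN (_map : List (String × List String)) (v n : String) : Int :=
  (((pvRow _map n).count v : Nat) : Int)

lemma pv_gps_sum (_map : List (String × List String)) (g1 g2 : List String) :
    pv_gps _map g1 g2 = (g1.map (pvC _map g2)).sum := by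
  unfold pv_gps
  rw [PySem.List.foldl_congr_mem' g1 _ (fun ps n => ps + pvC _map g2 n) 0
    (by intro n _ acc; exact PySem.List.foldl_if_add_one _ _ _)]
  rw [PySem.List.foldl_add]
  simp

-- the in-degree dict after subtracting one per occurrence in a row
lemma pv_row_sub (v : String) :
    ∀ (row : List String) (d : PySem.Dict String Int),
    (row.foldl (fun d e => d.insert e (d.getD e 0 - 1)) d).getD v 0
      = d.getD v 0 - (row.count v : Int) := by
  intro row
  induction row with
  | nil => simp
  | cons e t ih =>
    intro d
    simp only [List.foldl_cons, List.count_cons]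
    rw [ih, PySem.Dict.getD_insert]
    by_cases hve : v = e
    · subst hve; simp; ring
    · have : (e == v) = false := beq_eq_false_iff_ne.mpr (Ne.symm hve)
      simp [hve, this]

-- a decrement-if fold in closed form
lemma pv_foldl_if_sub (g2 : List String) :
    ∀ (row : List String) (a : Int),
    row.foldl (fun a e => if PySem.Set.contains g2 e then a - 1 else a) a
      = a - (row.countP (fun e => PySem.Set.contains g2 e) : Int) := by
  intro row
  induction row with
  | nil => simp
  | cons e t ih =>
    intro a
    simp only [List.foldl_cons, List.countP_cons]
    by_cases h : PySem.Set.contains g2 e = true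
    · rw [if_pos h, ih, if_pos h]; push_cast; ring
    · rw [if_neg h, ih, if_neg h]; push_cast; ring

lemma pv_cntP_append (edges g2 : List String) (v : String) (hv : v ∉ g2) :
    ((edges.countP (fun e => PySem.Set.contains (g2 ++ [v]) e) : Nat) : Int)
      = ((edges.countP (fun e => PySem.Set.contains g2 e) : Nat) : Int)
        + ((edges.count v : Nat) : Int) := by
  have hnat : edges.countP (fun e => PySem.Set.contains (g2 ++ [v]) e)
      = edges.countP (fun e => PySem.Set.contains g2 e) + edges.count v := by
    induction edges with
    | nil => simp
    | cons e t ih =>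
      simp only [List.countP_cons, List.count_cons]
      rw [ih]
      by_cases hev : e = v
      · subst hev
        have h1 : PySem.Set.contains (g2 ++ [e]) e = true := by
          simp [PySem.Set.contains_eq_listContains]
        have h2 : PySem.Set.contains g2 e = false := by
          simp only [PySem.Set.contains_eq_listContains]
          simpa using hv
        rw [h1, h2, beq_self_eq_true]
        simp
        omega
      · have h3 : PySem.Set.contains (g2 ++ [v]) e = PySem.Set.contains g2 e := by
          simp [PySem.Set.contains_eq_listContains, hev]
        have h4 : (e == v) = false := beq_eq_false_iff_ne.mpr hev
        rw [h3, h4]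
        simp
        omega
  rw [hnat]
  push_cast
  ring

-- removing v from the scanned set splits each row count (v ∈ g2c)
lemma pv_cntP_discard (edges g2c : List String) (v : String) (hv : v ∈ g2c) :
    ((edges.countP (fun e => PySem.Set.contains g2c e) : Nat) : Int)
      = ((edges.countP (fun e => PySem.Set.contains (PySem.Set.discard g2c v) e) : Nat) : Int)
        + ((edges.count v : Nat) : Int) := by
  have hcong : edges.countP (fun e => PySem.Set.contains g2c e)
      = edges.countP (fun e => PySem.Set.contains (PySem.Set.discard g2c v ++ [v]) e) := by
    apply List.countP_congr
    intro e _
    have : (e ∈ g2c) ↔ (e ∈ PySem.Set.discard g2c v ++ [v]) := by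
      simp only [List.mem_append, PySem.Set.mem_discard, List.mem_singleton]
      constructor
      · intro he; by_cases hev : e = v
        · exact Or.inr hev
        · exact Or.inl ⟨he, hev⟩
      · rintro (⟨he, _⟩ | rfl) <;> [exact he; exact hv]
    simp only [PySem.Set.contains_eq_listContains]
    by_cases h : e ∈ g2c
    · simp [h, this.mp h]
    · have h2 : e ∉ PySem.Set.discard g2c v ++ [v] := fun hx => h (this.mpr hx)
      simp [h, h2]
  have hnm : v ∉ PySem.Set.discard g2c v := by simp [PySem.Set.mem_discard]
  rw [hcong]
  exact pv_cntP_append edges (PySem.Set.discard g2c v) v hnm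

lemma pv_discard_append (g2 : List String) (v : String) (hv : v ∉ g2) :
    PySem.Set.discard (g2 ++ [v]) v = g2 := by
  unfold PySem.Set.discard
  rw [List.filter_append]
  have h1 : g2.filter (fun y => !y == v) = g2 :=
    List.filter_eq_self.mpr (by intro x hx; simp; exact fun h => hv (h ▸ hx))
  have h2 : [v].filter (fun y => !y == v) = [] := by simp
  rw [h1, h2, List.append_nil]

lemma pv_cons_discard_perm (g1' : List String) (v : String) (hnd : g1'.Nodup) (hv : v ∈ g1') :
    (v :: PySem.Set.discard g1' v).Perm g1' := by
  refine (List.perm_ext_iff_of_nodup ?_ hnd).mpr ?_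
  · exact List.nodup_cons.mpr ⟨by simp [PySem.Set.mem_discard], PySem.Set.nodup_discard _ _ hnd⟩
  · intro a
    simp only [List.mem_cons, PySem.Set.mem_discard]
    constructor
    · rintro (rfl | ⟨h, _⟩) <;> [exact hv; exact h]
    · intro ha; by_cases hav : a = v
      · exact Or.inl hav
      · exact Or.inr ⟨ha, hav⟩

-- sum over (discard g1' v) of F = sum over g1' of F minus F v  (g1' nodup, v ∈ g1')
lemma pv_sum_split (g1' : List String) (v : String) (F : String → Int)
    (hnd : g1'.Nodup) (hv : v ∈ g1') :
    ((PySem.Set.discard g1' v).map F).sum = (g1'.map F).sum - F v := by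
  have := ((pv_cons_discard_perm g1' v hnd hv).map F).sum_eq
  simp only [List.map_cons, List.sum_cons] at this
  omega

-- the nested in-degree preprocessing, per key
lemma pv_indeg (_map : List (String × List String)) (v : String) :
    ∀ (g1 : List String) (d : PySem.Dict String Int),
    (g1.foldl (fun d n => ((PySem.Dict.mk _map).getD n []).foldl
        (fun d e => d.insert e (d.getD e 0 + 1)) d) d).getD v 0
      = d.getD v 0 + (g1.map (pvN _map v)).sum := by
  intro g1
  induction g1 with
  | nil => simp
  | cons n t ih =>
    intro d
    simp only [List.foldl_cons, List.map_cons, List.sum_cons]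
    rw [ih, PySem.Dict.getD_foldl_insert_add_one]
    unfold pvN pvRow
    ring

-- the preprocessing fold is two independent folds
lemma pv_presplit (_map : List (String × List String)) (g2 : List String) :
    ∀ (g1 : List String) (d : PySem.Dict String Int) (a : Int),
    g1.foldl (fun p n => ((PySem.Dict.mk _map).getD n []).foldl
        (fun p e => (p.1.insert e (p.1.getD e 0 + 1),
          if PySem.Set.contains g2 e then p.2 + 1 else p.2)) p) (d, a)
      = (g1.foldl (fun x n => ((PySem.Dict.mk _map).getD n []).foldl
            (fun x e => x.insert e (x.getD e 0 + 1)) x) d,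
         g1.foldl (fun x n => ((PySem.Dict.mk _map).getD n []).foldl
            (fun x e => if PySem.Set.contains g2 e then x + 1 else x) x) a) := by
  intro g1
  induction g1 with
  | nil => intro d a; rfl
  | cons n t ih =>
    intro d a
    simp only [List.foldl_cons]
    rw [PySem.List.foldl_prod_mk
      (f := fun (x : PySem.Dict String Int) e => x.insert e (x.getD e 0 + 1))
      (g := fun x e => if PySem.Set.contains g2 e then x + 1 else x)]
    exact ih _ _

-- membership in the restored group_1 is unchanged
lemma pv_mem_restore (g1' : List String) (v a : String) (hv : v ∈ g1') :
    a ∈ PySem.Set.discard g1' v ++ [v] ↔ a ∈ g1' := by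
  simp only [List.mem_append, PySem.Set.mem_discard, List.mem_singleton]
  constructor
  · rintro (⟨h, _⟩ | rfl) <;> [exact h; exact hv]
  · intro ha; by_cases hav : a = v
    · exact Or.inr hav
    · exact Or.inl ⟨ha, hav⟩

-- joint induction: A's move-score-restore loop against B's incremental loop
lemma pv_loop (_map : List (String × List String)) :
    ∀ (cands g1' g2' : List String) (bn : Option String) (bs : Int)
      (ind : PySem.Dict String Int) (cut : Int),
    g1'.Nodup → g2'.Nodup →
    (∀ c ∈ cands, c ∈ g1') →
    (∀ v, ind.getD v 0 = (g1'.map (pvN _map v)).sum) →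
    cut = (g1'.map (pvC _map g2')).sum →
    (cands.foldl
      (fun (st : (Option String × Int) × PySem.Set String × PySem.Set String) node =>
        let g1 := (PySem.Set.remove? st.2.1 node).getD st.2.1
        let g2 := PySem.Set.add st.2.2 node
        let ps := pv_gps _map g1 g2 * PySem.Set.len g2
        ((if ps < st.1.2 then (some node, ps) else st.1),
          PySem.Set.add g1 node, (PySem.Set.remove? g2 node).getD g2))
      ((bn, bs), g1', g2')).1
    = (cands.foldl
      (fun (st : (Option String × Int) × (PySem.Dict String Int × Int) × PySem.Set String × PySem.Set String) node =>
        let g1 := (PySem.Set.remove? st.2.2.1 node).getD st.2.2.1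
        let p1 := ((PySem.Dict.mk _map).getD node []).foldl
          (fun p e => (p.1.insert e (p.1.getD e 0 - 1),
                       if PySem.Set.contains st.2.2.2 e then p.2 - 1 else p.2)) st.2.1
        let t := if ¬ (node ∈ st.2.2.2) then
            (PySem.Set.add st.2.2.2 node, p1.2 + p1.1.getD node 0)
          else (st.2.2.2, p1.2)
        let ps := t.2 * PySem.Set.len t.1
        let bst := if ps < st.1.2 then (some node, ps) else st.1
        let g2r := (PySem.Set.remove? t.1 node).getD t.1
        let c2 := t.2 - p1.1.getD node 0
        let p2 := ((PySem.Dict.mk _map).getD node []).foldl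
          (fun p e => (p.1.insert e (p.1.getD e 0 + 1),
                       if PySem.Set.contains g2r e then p.2 + 1 else p.2)) (p1.1, c2)
        (bst, p2, PySem.Set.add g1 node, g2r))
      ((bn, bs), (ind, cut), g1', g2')).1 := by
  intro cands
  induction cands with
  | nil => intro g1' g2' bn bs ind cut _ _ _ _ _; rfl
  | cons node t iht =>
    intro g1' g2' bn bs ind cut hnd1 hnd2 hc hind hcut
    have hv1 : node ∈ g1' := hc node List.mem_cons_self
    have e1 : PySem.Set.remove? g1' node = some (PySem.Set.discard g1' node) :=
      PySem.Set.remove?_of_mem hv1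
    have hrowsub :
        ((PySem.Dict.mk _map).getD node []).foldl
          (fun p e => (p.1.insert e (p.1.getD e 0 - 1),
            if PySem.Set.contains g2' e then p.2 - 1 else p.2)) (ind, cut)
        = (((PySem.Dict.mk _map).getD node []).foldl
            (fun d e => d.insert e (d.getD e 0 - 1)) ind,
           cut - pvC _map g2' node) := by
      rw [PySem.List.foldl_prod_mk
        (f := fun (d : PySem.Dict String Int) e => d.insert e (d.getD e 0 - 1))
        (g := fun a e => if PySem.Set.contains g2' e then a - 1 else a)]
      rw [pv_foldl_if_sub]
      rfl
    have hind1 : ∀ v, (((PySem.Dict.mk _map).getD node []).foldl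
        (fun d e => d.insert e (d.getD e 0 - 1)) ind).getD v 0
        = ind.getD v 0 - pvN _map v node := by
      intro v
      rw [pv_row_sub]
      rfl
    -- the restored group_1 and its invariants
    have hnd1' : (PySem.Set.discard g1' node ++ [node]).Nodup :=
      (List.perm_append_singleton node _).nodup_iff.mpr
        (List.nodup_cons.mpr ⟨by simp [PySem.Set.mem_discard], PySem.Set.nodup_discard _ _ hnd1⟩)
    have hpermD : (node :: PySem.Set.discard g1' node).Perm g1' :=
      pv_cons_discard_perm g1' node hnd1 hv1
    have hperm : (PySem.Set.discard g1' node ++ [node]).Perm g1' :=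
      (List.perm_append_singleton node _).trans hpermD
    have hct : ∀ c ∈ t, c ∈ PySem.Set.discard g1' node ++ [node] := by
      intro c hcm
      exact (pv_mem_restore g1' node c hv1).mpr (hc c (List.mem_cons_of_mem _ hcm))
    have hcutD : (cut - pvC _map g2' node)
        = ((PySem.Set.discard g1' node).map (pvC _map g2')).sum := by
      rw [hcut, pv_sum_split g1' node _ hnd1 hv1]
    have hindD : ∀ v, ind.getD v 0 - pvN _map v node
        = ((PySem.Set.discard g1' node).map (pvN _map v)).sum := by
      intro v
      rw [hind, pv_sum_split g1' node _ hnd1 hv1]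
    by_cases hmem : node ∈ g2'
    · -- the candidate is already in group_2: the add is a no-op, the restore removes it for good
      have e2 : PySem.Set.add g2' node = g2' := PySem.Set.add_of_mem hmem
      have e3 : PySem.Set.remove? g2' node = some (PySem.Set.discard g2' node) :=
        PySem.Set.remove?_of_mem hmem
      -- both scores are the cut of (g1' minus node) against g2'
      have hpsA : pv_gps _map (PySem.Set.discard g1' node) g2'
          = cut - pvC _map g2' node := by
        rw [pv_gps_sum, hcutD]
      -- B's undone cut: against g2' minus node
      have hc2 : (cut - pvC _map g2' node) - (ind.getD node 0 - pvN _map node node)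
          = ((PySem.Set.discard g1' node).map (pvC _map (PySem.Set.discard g2' node))).sum := by
        rw [hcutD, hindD]
        have : (PySem.Set.discard g1' node).map (pvC _map g2')
            = (PySem.Set.discard g1' node).map
                (fun n => pvC _map (PySem.Set.discard g2' node) n + pvN _map node n) := by
          apply List.map_congr_left
          intro n _
          unfold pvC pvN pvRow
          exact pv_cntP_discard _ g2' node hmem
        rw [this, PySem.List.sum_map_add_int]
        ring
      -- after re-adding the node's rows, the invariants hold for the shrunken g2
      have hcut2 : ((PySem.Set.discard g1' node).map (pvC _map (PySem.Set.discard g2' node))).sum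
            + pvC _map (PySem.Set.discard g2' node) node
          = ((PySem.Set.discard g1' node ++ [node]).map
              (pvC _map (PySem.Set.discard g2' node))).sum := by
        simp
      have hrowadd :
          ((PySem.Dict.mk _map).getD node []).foldl
            (fun p e => (p.1.insert e (p.1.getD e 0 + 1),
              if PySem.Set.contains (PySem.Set.discard g2' node) e then p.2 + 1 else p.2))
            (((PySem.Dict.mk _map).getD node []).foldl
              (fun d e => d.insert e (d.getD e 0 - 1)) ind,
             (cut - pvC _map g2' node) - (ind.getD node 0 - pvN _map node node))
          = (((PySem.Dict.mk _map).getD node []).foldl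
              (fun d e => d.insert e (d.getD e 0 + 1))
              (((PySem.Dict.mk _map).getD node []).foldl
                (fun d e => d.insert e (d.getD e 0 - 1)) ind),
             ((cut - pvC _map g2' node) - (ind.getD node 0 - pvN _map node node))
               + pvC _map (PySem.Set.discard g2' node) node) := by
        rw [PySem.List.foldl_prod_mk
          (f := fun (d : PySem.Dict String Int) e => d.insert e (d.getD e 0 + 1))
          (g := fun a e => if PySem.Set.contains (PySem.Set.discard g2' node) e then a + 1 else a)]
        rw [PySem.List.foldl_if_add_one]
        rfl
      have hind2 : ∀ v, (((PySem.Dict.mk _map).getD node []).foldl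
            (fun d e => d.insert e (d.getD e 0 + 1))
            (((PySem.Dict.mk _map).getD node []).foldl
              (fun d e => d.insert e (d.getD e 0 - 1)) ind)).getD v 0
          = ((PySem.Set.discard g1' node ++ [node]).map (pvN _map v)).sum := by
        intro v
        rw [PySem.Dict.getD_foldl_insert_add_one, hind1, hind, ← (hperm.map (pvN _map v)).sum_eq]
        unfold pvN pvRow
        ring
      have e4 : PySem.Set.add (PySem.Set.discard g1' node) node
          = PySem.Set.discard g1' node ++ [node] :=
        PySem.Set.add_of_not_mem (by simp [PySem.Set.mem_discard])
      simp only [List.foldl_cons, e1, e2, e3, e4, Option.getD_some, hrowsub, hrowadd,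
        hind1, not_true_eq_false, if_false, hmem, hpsA]
      exact iht _ _ _ _ _ _ hnd1' (PySem.Set.nodup_discard _ _ hnd2) hct hind2
        (by rw [hc2]; exact hcut2)
    · -- the candidate joins group_2 for the score and is taken out again
      have e2 : PySem.Set.add g2' node = g2' ++ [node] := PySem.Set.add_of_not_mem hmem
      have e3 : PySem.Set.remove? (g2' ++ [node]) node
          = some (PySem.Set.discard (g2' ++ [node]) node) :=
        PySem.Set.remove?_of_mem (by simp)
      have e5 : PySem.Set.discard (g2' ++ [node]) node = g2' :=
        pv_discard_append g2' node hmem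
      -- both scores are the cut of (g1' minus node) against (g2' plus node)
      have hpsA : pv_gps _map (PySem.Set.discard g1' node) (g2' ++ [node])
          = (cut - pvC _map g2' node) + (ind.getD node 0 - pvN _map node node) := by
        rw [pv_gps_sum, hcutD, hindD]
        have : (PySem.Set.discard g1' node).map (pvC _map (g2' ++ [node]))
            = (PySem.Set.discard g1' node).map
                (fun n => pvC _map g2' n + pvN _map node n) := by
          apply List.map_congr_left
          intro n _
          unfold pvC pvN pvRow
          exact pv_cntP_append _ g2' node hmem
        rw [this, PySem.List.sum_map_add_int]
      have hrowadd :
          ((PySem.Dict.mk _map).getD node []).foldl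
            (fun p e => (p.1.insert e (p.1.getD e 0 + 1),
              if PySem.Set.contains g2' e then p.2 + 1 else p.2))
            (((PySem.Dict.mk _map).getD node []).foldl
              (fun d e => d.insert e (d.getD e 0 - 1)) ind,
             ((cut - pvC _map g2' node) + (ind.getD node 0 - pvN _map node node))
               - (ind.getD node 0 - pvN _map node node))
          = (((PySem.Dict.mk _map).getD node []).foldl
              (fun d e => d.insert e (d.getD e 0 + 1))
              (((PySem.Dict.mk _map).getD node []).foldl
                (fun d e => d.insert e (d.getD e 0 - 1)) ind),
             (((cut - pvC _map g2' node) + (ind.getD node 0 - pvN _map node node))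
               - (ind.getD node 0 - pvN _map node node)) + pvC _map g2' node) := by
        rw [PySem.List.foldl_prod_mk
          (f := fun (d : PySem.Dict String Int) e => d.insert e (d.getD e 0 + 1))
          (g := fun a e => if PySem.Set.contains g2' e then a + 1 else a)]
        rw [PySem.List.foldl_if_add_one]
        rfl
      have hind2 : ∀ v, (((PySem.Dict.mk _map).getD node []).foldl
            (fun d e => d.insert e (d.getD e 0 + 1))
            (((PySem.Dict.mk _map).getD node []).foldl
              (fun d e => d.insert e (d.getD e 0 - 1)) ind)).getD v 0
          = ((PySem.Set.discard g1' node ++ [node]).map (pvN _map v)).sum := by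
        intro v
        rw [PySem.Dict.getD_foldl_insert_add_one, hind1, hind, ← (hperm.map (pvN _map v)).sum_eq]
        unfold pvN pvRow
        ring
      have hcut2 : (((cut - pvC _map g2' node) + (ind.getD node 0 - pvN _map node node))
            - (ind.getD node 0 - pvN _map node node)) + pvC _map g2' node
          = ((PySem.Set.discard g1' node ++ [node]).map (pvC _map g2')).sum := by
        rw [hcutD]
        simp
      have e4 : PySem.Set.add (PySem.Set.discard g1' node) node
          = PySem.Set.discard g1' node ++ [node] :=
        PySem.Set.add_of_not_mem (by simp [PySem.Set.mem_discard])
      simp only [List.foldl_cons, e1, e2, e3, e4, e5, Option.getD_some, hrowsub, hrowadd,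
        hind1, hmem, not_false_eq_true, if_true, hpsA]
      exact iht _ _ _ _ _ _ hnd1' hnd2 hct hind2 hcut2

-- ===== VERDICT (by name: the statement is the Claim_ definition above) =====
theorem find_best_node_spec : Claim_equal_find_best_node := by
  intro _map bn bs cands g1 g2 _hdom hpre
  obtain ⟨hc, hrest⟩ := hpre
  unfold Spec_find_best_node
  cases cands with
  | nil => rfl
  | cons c t =>
    obtain ⟨hnd1, hnd2, _hkeys⟩ := hrest (by simp)
    unfold find_best_node find_best_node_alt
    rw [if_neg (by simp)]
    rw [pv_presplit]
    exact pv_loop _map (c :: t) g1 g2 bn bs _ _ hnd1 hnd2 hc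
      (fun v => by simpa using pv_indeg _map v g1 PySem.Dict.empty)
      (by simpa [pv_gps] using (pv_gps_sum _map g1 g2))
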